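-- pv_equiv track=rewrite | github.com/KonstBeliakov/preparation-for-the-exam-in-computer-science | unsorted/4.py | f
-- ===== SOURCE A (Python) =====
-- def f(x):
--     s = set()
--     t = 0
--     for i in range(2, x):
--         if x % i == 0:
--             s.add(i)
--             s.add(x // i)
--         if i * i > x:
--             break
--     return None if (len(s) < 5) else sorted(s)[:-6:-1]
-- ===== SOURCE B (Python) =====
-- def f(x):
--     # Factorise x by trial division and build ALL of its divisors
--     # multiplicatively from the prime powers; then keep the five largest
--     # proper ones (excluding 1 and x), in descending order.
--     if x < 2:
--         return None
--     divs = [1]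
--     n = x
--     p = 2
--     while p * p <= n:
--         pe = 1
--         powers = [1]
--         while n % p == 0:
--             n //= p
--             pe *= p
--             powers.append(pe)
--         divs = [d * q for d in divs for q in powers]
--         p += 1
--     if n > 1:
--         divs = [d * q for d in divs for q in (1, n)]
--     proper = [d for d in divs if d != 1 and d != x]
--     proper.sort(reverse=True)
--     return proper[:5] if len(proper) >= 5 else None
-- ===== Notes on version B (the rewrite author's own statement) =====
-- stated objective: alternative
-- what changed: Instead of A's sqrt-bounded scan that pairs each small divisor with its cofactor in a set and then sorts and reverse-slices it, B factorises x by trial division and generates the complete divisor list multiplicatively from the prime powers, then filters out 1 and x and sorts descending for the top five.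
import Mathlib
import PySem

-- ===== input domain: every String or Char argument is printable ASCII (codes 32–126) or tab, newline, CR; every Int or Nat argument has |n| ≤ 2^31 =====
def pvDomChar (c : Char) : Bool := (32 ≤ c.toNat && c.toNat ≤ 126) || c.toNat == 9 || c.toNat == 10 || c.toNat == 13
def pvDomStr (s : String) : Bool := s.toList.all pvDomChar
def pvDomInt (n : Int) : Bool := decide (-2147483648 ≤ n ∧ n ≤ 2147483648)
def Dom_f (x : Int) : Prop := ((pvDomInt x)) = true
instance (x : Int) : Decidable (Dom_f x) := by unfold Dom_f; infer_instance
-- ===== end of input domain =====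

-- B builds the complete divisor list of x multiplicatively from its prime
-- factorisation (trial division), then filters out 1 and x and sorts descending
-- for the top five (objective: alternative algorithm, similar cost).

-- ===== PORT A =====
-- for i in range(2, x): … with break after processing the first i with i*i > x
def loopA (x : Int) : PySem.Set Int → List Int → PySem.Set Int
  | s, [] => s
  | s, i :: rest =>
    let s' := if PySem.Int.mod x i = 0
      then PySem.Set.add (PySem.Set.add s i) (PySem.Int.floordiv x i) else s
    if i * i > x then s' else loopA x s' rest

def f (x : Int) : Option (List Int) :=
  -- (Python's unused 't = 0' is dropped)
  let s := loopA x PySem.Set.empty (PySem.List.pyRange 2 x 1)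
  if (PySem.Set.len s : Int) < 5 then none
  else PySem.List.slice? (PySem.List.sorted s (fun v => v) false) none (some (-6)) (-1)

-- ===== PORT B =====
-- inner while: strip all factors p from n, recording the powers pe = p^k.
-- 'fuel' is a totality device only: the loop divides n by p >= 2 each step, so
-- fuel = n.toNat can never run out on the calls B makes.
def stripB (fuel : Nat) (p n pe : Int) (powers : List Int) : Int × Int × List Int :=
  match fuel with
  | 0 => (n, pe, powers)
  | fuel + 1 =>
    if PySem.Int.mod n p = 0 then
      stripB fuel p (PySem.Int.floordiv n p) (pe * p) (powers ++ [pe * p])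
    else (n, pe, powers)

-- outer while p * p <= n: multiply every known divisor by every power of p found
-- (fuel = x.toNat bounds the number of p-increments, again a totality device only)
def outerB (fuel : Nat) (x n p : Int) (divs : List Int) : Int × List Int :=
  match fuel with
  | 0 => (n, divs)
  | fuel + 1 =>
    if p * p ≤ n then
      outerB fuel x (stripB n.toNat p n 1 [1]).1 (p + 1)
        (divs.flatMap (fun d => (stripB n.toNat p n 1 [1]).2.2.map (fun q => d * q)))
    else (n, divs)

def f_alt (x : Int) : Option (List Int) :=
  if x < 2 then none
  else
    let r := outerB x.toNat x x 2 [1]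
    let divs := if 1 < r.1 then r.2.flatMap (fun d => [(1 : Int), r.1].map (fun q => d * q))
      else r.2
    let proper := divs.filter (fun d => !(d == 1) && !(d == x))
    let sortedp := PySem.List.sorted proper (fun v => v) true
    if 5 ≤ (sortedp.length : Int) then some (PySem.List.slice sortedp none (some 5)) else none

-- ===== PRECONDITION & SPEC =====
def Spec_f (x : Int) (out : Option (List Int)) : Prop := out = f_alt x
instance (x : Int) (out : Option (List Int)) : Decidable (Spec_f x out) := by unfold Spec_f; infer_instance

-- ===== CLAIM (what is proved, stated in full; the proofs are below) =====
def Claim_equal_f : Prop := ∀ (x : Int), Dom_f x → Spec_f x (f x)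

-- ===== LEMMAS AND PROOFS =====

-- the ascending list of all divisors of x in [2, x-1]
def pvD (x : Int) : List Int :=
  (PySem.List.pyRange 2 x 1).filter (fun i => PySem.Int.mod x i == 0)

-- loopA without the break: plain fold of divisor-pair insertions
def divAcc (x : Int) (s : PySem.Set Int) (l : List Int) : PySem.Set Int :=
  l.foldl (fun s i => if PySem.Int.mod x i = 0
    then PySem.Set.add (PySem.Set.add s i) (PySem.Int.floordiv x i) else s) s

-- the prefix of the range A actually processes (break after first i with i*i > x)
def procA (x : Int) : List Int → List Int
  | [] => []
  | i :: t => if i * i > x then [i] else i :: procA x t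

theorem mem_pvD {x d : Int} :
    d ∈ pvD x ↔ 2 ≤ d ∧ d < x ∧ PySem.Int.mod x d = 0 := by
  simp [pvD, List.mem_filter, PySem.List.mem_pyRange_one, and_assoc]

theorem cofactor_facts {x d : Int} (hx : 0 < x) (hd2 : 2 ≤ d) (hdx : d < x)
    (hdvd : d ∣ x) :
    2 ≤ x / d ∧ x / d < x ∧ (x / d) ∣ x ∧ (x / d) * d = x ∧ x / (x / d) = d := by
  obtain ⟨q, hq⟩ := hdvd
  have hd0 : d ≠ 0 := by omega
  have hqd : x / d = q := by rw [hq]; exact Int.mul_ediv_cancel_left q hd0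
  have hq1 : 1 ≤ q := by nlinarith
  have hq2 : 2 ≤ q := by
    rcases lt_or_ge q 2 with h | h
    · interval_cases q <;> omega
    · exact h
  refine ⟨by omega, by nlinarith, ⟨d, by rw [hqd, mul_comm]; exact hq⟩,
    by rw [hqd]; linarith [hq], ?_⟩
  rw [hqd, hq, mul_comm]
  exact Int.mul_ediv_cancel_left d (by omega)

theorem loopA_eq_divAcc (x : Int) : ∀ (l : List Int) (s : PySem.Set Int),
    loopA x s l = divAcc x s (procA x l) := by
  intro l
  induction l with
  | nil => intro s; rfl
  | cons i t ih =>
    intro s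
    simp only [loopA, procA]
    split
    · simp [divAcc]
    · simp only [divAcc, List.foldl_cons] at *
      exact ih _

theorem mem_divAcc (x : Int) : ∀ (l : List Int) (s : PySem.Set Int) (d : Int),
    d ∈ divAcc x s l ↔ d ∈ s ∨ ∃ i ∈ l, PySem.Int.mod x i = 0 ∧
      (d = i ∨ d = PySem.Int.floordiv x i) := by
  intro l
  induction l with
  | nil => simp [divAcc]
  | cons i t ih =>
    intro s d
    simp only [divAcc, List.foldl_cons] at *
    rw [ih]
    split
    · rename_i hm
      simp only [PySem.Set.mem_add, List.mem_cons]
      constructor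
      · rintro (((h | h) | h) | h)
        · exact Or.inl h
        · exact Or.inr ⟨i, Or.inl rfl, hm, Or.inl h⟩
        · exact Or.inr ⟨i, Or.inl rfl, hm, Or.inr h⟩
        · obtain ⟨j, hj, h1, h2⟩ := h
          exact Or.inr ⟨j, Or.inr hj, h1, h2⟩
      · rintro (h | ⟨j, (rfl | hj), h1, h2⟩)
        · exact Or.inl (Or.inl (Or.inl h))
        · rcases h2 with h2 | h2
          · exact Or.inl (Or.inl (Or.inr h2))
          · exact Or.inl (Or.inr h2)
        · exact Or.inr ⟨j, hj, h1, h2⟩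
    · rename_i hm
      simp only [List.mem_cons]
      constructor
      · rintro (h | ⟨j, hj, h1, h2⟩)
        · exact Or.inl h
        · exact Or.inr ⟨j, Or.inr hj, h1, h2⟩
      · rintro (h | ⟨j, (rfl | hj), h1, h2⟩)
        · exact Or.inl h
        · exact absurd h1 hm
        · exact Or.inr ⟨j, hj, h1, h2⟩

theorem nodup_divAcc (x : Int) : ∀ (l : List Int) (s : PySem.Set Int),
    s.Nodup → (divAcc x s l).Nodup := by
  intro l
  induction l with
  | nil => intro s h; exact h
  | cons i t ih =>
    intro s h
    simp only [divAcc, List.foldl_cons] at *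
    apply ih
    split
    · exact PySem.Set.nodup_add _ _ (PySem.Set.nodup_add _ _ h)
    · exact h

theorem procA_subset (x : Int) : ∀ (l : List Int), procA x l ⊆ l := by
  intro l
  induction l with
  | nil => simp [procA]
  | cons i t ih =>
    simp only [procA]
    split
    · intro a ha; simp at ha; simp [ha]
    · intro a ha
      rcases List.mem_cons.mp ha with h | h
      · simp [h]
      · exact List.mem_cons_of_mem _ (ih h)

theorem procA_mem_range (x : Int) : ∀ (n : Nat) (a b i : Int), (b - a).toNat = n →
    2 ≤ a → a ≤ i → i < b → i * i ≤ x →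
    i ∈ procA x (PySem.List.pyRange a b 1) := by
  intro n
  induction n with
  | zero => intro a b i hn ha hai hib _; omega
  | succ m ih =>
    intro a b i hn ha hai hib hsq
    rw [PySem.List.pyRange_one_cons (by omega)]
    simp only [procA]
    rcases eq_or_lt_of_le hai with rfl | hlt
    · rw [if_neg (by omega)]
      exact List.mem_cons_self
    · have hax : a * a ≤ x := by nlinarith
      rw [if_neg (by omega)]
      exact List.mem_cons_of_mem _ (ih (a+1) b i (by omega) (by omega) (by omega) hib hsq)

theorem memA {x d : Int} :
    d ∈ loopA x PySem.Set.empty (PySem.List.pyRange 2 x 1) ↔ d ∈ pvD x := by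
  rw [loopA_eq_divAcc, mem_divAcc]
  constructor
  · rintro (h | ⟨i, hi, hm, hd⟩)
    · simp [PySem.Set.empty] at h
    · have hir : i ∈ PySem.List.pyRange 2 x 1 := procA_subset x _ hi
      rw [PySem.List.mem_pyRange_one] at hir
      obtain ⟨hi2, hix⟩ := hir
      have hx : 0 < x := by omega
      have hdvd : i ∣ x := (PySem.Int.mod_eq_zero_iff_dvd x i).mp hm
      have hfd : PySem.Int.floordiv x i = x / i :=
        PySem.Int.floordiv_eq_ediv_of_pos (by omega)
      obtain ⟨hq2, hqx, hqdvd, _, _⟩ := cofactor_facts hx hi2 hix hdvd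
      rcases hd with rfl | rfl
      · exact mem_pvD.mpr ⟨hi2, hix, hm⟩
      · rw [hfd]
        exact mem_pvD.mpr ⟨hq2, hqx, (PySem.Int.mod_eq_zero_iff_dvd x _).mpr hqdvd⟩
  · intro h
    obtain ⟨hd2, hdx, hm⟩ := mem_pvD.mp h
    have hx : 0 < x := by omega
    have hdvd : d ∣ x := (PySem.Int.mod_eq_zero_iff_dvd x d).mp hm
    obtain ⟨hq2, hqx, hqdvd, hqmul, hqq⟩ := cofactor_facts hx hd2 hdx hdvd
    right
    rcases le_or_gt (d * d) x with hdd | hdd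
    · exact ⟨d, procA_mem_range x _ 2 x d rfl le_rfl hd2 hdx hdd, hm, Or.inl rfl⟩
    · refine ⟨x / d, ?_, (PySem.Int.mod_eq_zero_iff_dvd x _).mpr hqdvd, Or.inr ?_⟩
      · have hqd : x / d < d := by nlinarith
        have hqsq : (x / d) * (x / d) ≤ x := by nlinarith
        exact procA_mem_range x _ 2 x (x / d) rfl le_rfl hq2 hqx hqsq
      · rw [PySem.Int.floordiv_eq_ediv_of_pos (by omega), hqq]

theorem nodupA (x : Int) :
    (loopA x PySem.Set.empty (PySem.List.pyRange 2 x 1)).Nodup := by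
  rw [loopA_eq_divAcc]
  exact nodup_divAcc x _ _ (by simp [PySem.Set.empty])

theorem pairwise_lt_pvD (x : Int) : (pvD x).Pairwise (· < ·) :=
  List.Pairwise.filter _ (PySem.List.pairwise_lt_pyRange_one 2 x)

theorem permA (x : Int) :
    (pvD x).Perm (loopA x PySem.Set.empty (PySem.List.pyRange 2 x 1)) := by
  rw [List.perm_ext_iff_of_nodup ((pairwise_lt_pvD x).imp ne_of_lt) (nodupA x)]
  intro d
  exact memA.symm

theorem sortedA (x : Int) :
    PySem.List.sorted (loopA x PySem.Set.empty (PySem.List.pyRange 2 x 1))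
      (fun v => v) false = pvD x :=
  PySem.List.sorted_eq_of_perm_of_pairwise_lt _ _ _ (permA x) (pairwise_lt_pvD x)

theorem fm_take (xs : List Int) : ∀ (m : Nat), m ≤ xs.length →
    List.filterMap (fun (k : Nat) => xs[((xs.length : Int) - 1 + -(k : Int)).toNat]?)
      (List.range m) = xs.reverse.take m := by
  intro m
  induction m with
  | zero => simp
  | succ m ih =>
    intro hm
    rw [List.range_succ, List.filterMap_append, ih (by omega)]
    have hidx : (((xs.length : Int) - 1 + -(m : Int))).toNat = xs.length - 1 - m := by omega
    have hlt : xs.length - 1 - m < xs.length := by omega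
    rw [List.take_succ]
    congr 1
    rw [List.getElem?_reverse (by omega)]
    simp only [List.filterMap_cons, List.filterMap_nil, hidx]
    rw [List.getElem?_eq_getElem hlt]
    rfl

theorem slice_last5 (xs : List Int) :
    PySem.List.slice? xs none (some (-6)) (-1) = some (xs.reverse.take 5) := by
  simp only [PySem.List.slice?, PySem.List.sliceIndices]
  norm_num
  have hc : (if (xs.length : Int) < 6 + ((xs.length : Int) - 1) ∧ 0 < xs.length
      then (((xs.length : Int) - 1 - max (-6 + (xs.length : Int)) (-1)).toNat) else 0)
      = min 5 xs.length := by
    split <;> omega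
  rw [hc, fm_take xs (min 5 xs.length) (by omega)]
  rcases le_or_gt 5 xs.length with h | h
  · rw [min_eq_left h]
  · rw [min_eq_right (by omega), List.take_of_length_le (by simp),
      List.take_of_length_le (by simp; omega)]

-- f x in closed form: None below five divisors, else the largest five descending
theorem f_closed (x : Int) :
    f x = if ((pvD x).length : Int) < 5 then none
      else some ((pvD x).reverse.take 5) := by
  have hzeta : f x = if (PySem.Set.len (loopA x PySem.Set.empty
      (PySem.List.pyRange 2 x 1)) : Int) < 5 then none
      else PySem.List.slice? (PySem.List.sorted (loopA x PySem.Set.empty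
        (PySem.List.pyRange 2 x 1)) (fun v => v) false) none (some (-6)) (-1) := rfl
  rw [hzeta]
  have hlen : PySem.Set.len (loopA x PySem.Set.empty (PySem.List.pyRange 2 x 1))
      = (pvD x).length := by
    rw [PySem.Set.len, (permA x).length_eq]
  rw [hlen, sortedA x, slice_last5]

-- ------- B-side lemmas -------

-- exact division by p >= 2 shrinks a positive n
theorem pv_ediv_bounds {n p : Int} (hn : 0 < n) (hp : 2 ≤ p)
    (hm : PySem.Int.mod n p = 0) :
    0 ≤ PySem.Int.floordiv n p ∧ PySem.Int.floordiv n p < n := by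
  obtain ⟨c, hc⟩ := (PySem.Int.mod_eq_zero_iff_dvd n p).mp hm
  have hfd : PySem.Int.floordiv n p = n / p :=
    PySem.Int.floordiv_eq_ediv_of_pos (by omega)
  have hcv : n / p = c := by rw [hc]; exact Int.mul_ediv_cancel_left c (by omega)
  refine ⟨by rw [hfd, hcv]; nlinarith, by rw [hfd, hcv]; nlinarith⟩


-- n has no divisor in [2, p)
def NoSmall (p n : Int) : Prop := ∀ k : Int, 2 ≤ k → k < p → ¬ k ∣ n

-- every positive prime divisor of m is < p
def PrimesLt (p m : Int) : Prop := ∀ q : Int, Prime q → 0 < q → q ∣ m → q < p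

theorem two_le_of_prime_pos {q : Int} (hq : Prime q) (h0 : 0 < q) : 2 ≤ q := by
  have h2 := (Int.prime_iff_natAbs_prime.mp hq).two_le
  omega

theorem stripB_spec : ∀ (fuel : Nat) (p n pe : Int) (pw : List Int),
    2 ≤ p → 0 < n → n.toNat ≤ fuel →
    ∃ e : Nat, (stripB fuel p n pe pw).1 * p ^ e = n ∧ 0 < (stripB fuel p n pe pw).1 ∧
      ¬ p ∣ (stripB fuel p n pe pw).1 ∧
      (stripB fuel p n pe pw).2.2 = pw ++ (List.range e).map (fun k => pe * p ^ (k + 1)) := by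
  intro fuel
  induction fuel with
  | zero =>
    intro p n pe pw hp hn hfuel
    omega
  | succ fuel ih =>
    intro p n pe pw hp hn hfuel
    by_cases hm : PySem.Int.mod n p = 0
    · rw [stripB, if_pos hm]
      obtain ⟨c, hc⟩ := (PySem.Int.mod_eq_zero_iff_dvd n p).mp hm
      have hfd : PySem.Int.floordiv n p = n / p :=
        PySem.Int.floordiv_eq_ediv_of_pos (by omega)
      have hcv : PySem.Int.floordiv n p = c := by
        rw [hfd, hc]; exact Int.mul_ediv_cancel_left c (by omega)
      have hc0 : 0 < c := by nlinarith
      have hlt : PySem.Int.floordiv n p < n := (pv_ediv_bounds hn hp hm).2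
      have hge : 0 ≤ PySem.Int.floordiv n p := (pv_ediv_bounds hn hp hm).1
      obtain ⟨e, h1, h2, h3, h4⟩ := ih p (PySem.Int.floordiv n p) (pe * p)
        (pw ++ [pe * p]) hp (by omega) (by omega)
      refine ⟨e + 1, ?_, h2, h3, ?_⟩
      · rw [pow_succ, ← mul_assoc, h1, hcv, hc]; ring
      · rw [h4, List.append_assoc]
        congr 1
        rw [List.singleton_append, List.range_succ_eq_map, List.map_cons,
          List.map_map]
        congr 1
        · ring
        · apply List.map_congr_left
          intro k _
          simp only [Function.comp_apply, pow_succ, Nat.succ_eq_add_one]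
          ring
    · rw [stripB, if_neg hm]
      refine ⟨0, by simp, hn, ?_, by simp⟩
      intro hdvd
      exact hm ((PySem.Int.mod_eq_zero_iff_dvd n p).mpr hdvd)

-- uniqueness of the decomposition d * q^k (q prime not dividing d)
theorem pv_pow_eq {q d d' : Int} (hq0 : q ≠ 0) (hqd : ¬ q ∣ d) (hd0 : d ≠ 0)
    {k j : Nat} (hkj : k ≤ j) (heq : d * q ^ k = d' * q ^ j) : d = d' ∧ k = j := by
  have hcan : d = d' * q ^ (j - k) := by
    have hjj : q ^ j = q ^ k * q ^ (j - k) := by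
      rw [← pow_add]; congr 1; omega
    have heq2 : d * q ^ k = (d' * q ^ (j - k)) * q ^ k := by
      rw [heq, hjj]; ring
    exact mul_right_cancel₀ (pow_ne_zero k hq0) heq2
  rcases Nat.eq_zero_or_pos (j - k) with h0 | hpos
  · rw [h0, pow_zero, mul_one] at hcan; exact ⟨hcan, by omega⟩
  · exfalso
    apply hqd
    rw [hcan]
    have hs : q ^ (j - k) = q * q ^ (j - k - 1) := by
      rw [← pow_succ']; congr 1; omega
    rw [hs]
    exact ⟨d' * q ^ (j - k - 1), by ring⟩

-- existence of the decomposition for any divisor of m * q^e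
theorem pv_exists_decomp {q : Int} (hq : Prime q) (hq0 : 0 < q) :
    ∀ (e : Nat) (m t : Int), 0 < t → t ∣ m * q ^ e →
      ∃ (d : Int) (k : Nat), 1 ≤ d ∧ d ∣ m ∧ k ≤ e ∧ t = d * q ^ k := by
  intro e
  induction e with
  | zero =>
    intro m t ht hdvd
    exact ⟨t, 0, ht, by simpa using hdvd, le_refl 0, by simp⟩
  | succ e ih =>
    intro m t ht hdvd
    by_cases hqt : q ∣ t
    · obtain ⟨t', ht'⟩ := hqt
      have ht'0 : 0 < t' := by nlinarith
      have hdvd' : t' ∣ m * q ^ e := by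
        have h1 : q * t' ∣ q * (m * q ^ e) := by
          rw [← ht']; convert hdvd using 1; ring
        exact (mul_dvd_mul_iff_left hq.ne_zero).mp h1
      obtain ⟨d, k, hd1, hdm, hke, hteq⟩ := ih m t' ht'0 hdvd'
      exact ⟨d, k + 1, hd1, hdm, by omega, by rw [ht', hteq]; ring⟩
    · have hcop : IsCoprime q t := (hq.coprime_iff_not_dvd).mpr hqt
      have hdm : t ∣ m := (hcop.pow_left.symm).dvd_of_dvd_mul_right hdvd
      exact ⟨t, 0, ht, hdm, by omega, by simp⟩

-- one multiplicative step: from all divisors of m to all divisors of m * q^e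
theorem pv_cover_step {m q : Int} (e : Nat) (hm : 0 < m) (hq : Prime q)
    (hq0 : 0 < q) (hqm : ¬ q ∣ m) (divs : List Int) (hnd : divs.Nodup)
    (hcov : ∀ d : Int, d ∈ divs ↔ 1 ≤ d ∧ d ∣ m) (pows : List Int)
    (hpows : pows = (List.range (e + 1)).map (fun k => q ^ k)) :
    (divs.flatMap (fun d => pows.map (fun w => d * w))).Nodup ∧
    (∀ t : Int, t ∈ divs.flatMap (fun d => pows.map (fun w => d * w)) ↔
      1 ≤ t ∧ t ∣ m * q ^ e) := by
  subst hpows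
  have hq2 : 2 ≤ q := two_le_of_prime_pos hq hq0
  have hqd : ∀ d ∈ divs, ¬ q ∣ d :=
    fun d hd hqd => hqm (dvd_trans hqd ((hcov d).mp hd).2)
  constructor
  · rw [List.nodup_flatMap]
    constructor
    · intro d hd
      have hd1 : 1 ≤ d := ((hcov d).mp hd).1
      rw [List.map_map]
      apply List.Nodup.map ?_ List.nodup_range
      intro k j hkj
      simp only [Function.comp_apply] at hkj
      have hpq : q ^ k = q ^ j := mul_left_cancel₀ (by omega : d ≠ 0) hkj
      have hnat : q.natAbs ^ k = q.natAbs ^ j := by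
        have := congrArg Int.natAbs hpq
        simpa [Int.natAbs_pow] using this
      exact Nat.pow_right_injective (by omega : 2 ≤ q.natAbs) hnat
    · refine hnd.imp_of_mem ?_
      intro a b ha hb hab t hta htb
      simp only [List.map_map, List.mem_map, List.mem_range, Function.comp_apply] at hta htb
      obtain ⟨k, hk, hka⟩ := hta
      obtain ⟨j, hj, hjb⟩ := htb
      have heq : a * q ^ k = b * q ^ j := by rw [hka, hjb]
      have ha1 : 1 ≤ a := ((hcov a).mp ha).1
      have hb1 : 1 ≤ b := ((hcov b).mp hb).1
      rcases le_total k j with hkj | hkj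
      · exact hab (pv_pow_eq (by omega) (hqd a ha) (by omega) hkj heq).1
      · exact hab ((pv_pow_eq (by omega) (hqd b hb) (by omega) hkj heq.symm).1).symm
  · intro t
    rw [List.mem_flatMap]
    constructor
    · rintro ⟨d, hd, ht⟩
      simp only [List.map_map, List.mem_map, List.mem_range, Function.comp_apply] at ht
      obtain ⟨k, hk, rfl⟩ := ht
      obtain ⟨hd1, hdm⟩ := (hcov d).mp hd
      have hpk : 0 < q ^ k := pow_pos (by omega) k
      exact ⟨by nlinarith, mul_dvd_mul hdm (pow_dvd_pow q (by omega))⟩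
    · rintro ⟨ht1, htdvd⟩
      obtain ⟨d, k, hd1, hdm, hke, rfl⟩ :=
        pv_exists_decomp hq hq0 e m t (by omega) htdvd
      refine ⟨d, (hcov d).mpr ⟨hd1, hdm⟩, ?_⟩
      simp only [List.map_map, List.mem_map, List.mem_range, Function.comp_apply]
      exact ⟨k, by omega, rfl⟩

theorem pv_prime_of_no_small {p n : Int} (hp : 2 ≤ p) (hn : 1 < n)
    (hns : NoSmall p n) (hsq : n < p * p) : Prime n := by
  rw [Int.prime_iff_natAbs_prime]
  by_contra hnp
  have hq := Nat.minFac_prime (by omega : n.natAbs ≠ 1)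
  have hqsq := Nat.minFac_sq_le_self (by omega : 0 < n.natAbs) hnp
  set q := n.natAbs.minFac with hqdef
  have hq2 : 2 ≤ q := hq.two_le
  have hqdvd : (q : Int) ∣ n := by
    have h1 : (q : Int) ∣ (n.natAbs : Int) := Int.natCast_dvd_natCast.mpr (Nat.minFac_dvd _)
    rwa [Int.natAbs_of_nonneg (by omega : (0:Int) ≤ n)] at h1
  have hqq : (q : Int) * q ≤ n := by
    have hh : q * q ≤ n.natAbs := by nlinarith [hqsq]
    have hc : ((q * q : Nat) : Int) ≤ ((n.natAbs : Nat) : Int) := Int.ofNat_le.mpr hh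
    push_cast at hc
    omega
  have hqp : (q : Int) < p := by nlinarith
  exact hns q (by exact_mod_cast hq2) hqp hqdvd

theorem pv_prime_of_dvd_no_small {p n : Int} (hp : 2 ≤ p) (hn : 0 < n)
    (hns : NoSmall p n) (hdvd : p ∣ n) : Prime p := by
  rw [Int.prime_iff_natAbs_prime]
  by_contra hnp
  obtain ⟨m, hmdvd, hm2, hmlt⟩ := Nat.exists_dvd_of_not_prime2 (by omega : 2 ≤ p.natAbs) hnp
  have hmp : (m : Int) ∣ p := by
    have h1 : (m : Int) ∣ (p.natAbs : Int) := Int.natCast_dvd_natCast.mpr hmdvd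
    rwa [Int.natAbs_of_nonneg (by omega : (0:Int) ≤ p)] at h1
  exact hns m (by exact_mod_cast hm2) (by omega) (hmp.trans hdvd)

theorem pv_prime_dvd_prime {p q : Int} (hp : Prime p) (hq : Prime q)
    (hp0 : 0 < p) (hq0 : 0 < q) (hdvd : q ∣ p) : q = p := by
  have h1 : q.natAbs ∣ p.natAbs := Int.natAbs_dvd_natAbs.mpr hdvd
  have h2 := (Int.prime_iff_natAbs_prime.mp hp).eq_one_or_self_of_dvd q.natAbs h1
  have hq2 : 2 ≤ q.natAbs := (Int.prime_iff_natAbs_prime.mp hq).two_le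
  omega

-- the loop's exit state, when the guard p * p <= n fails
theorem outerB_exit {x n p : Int} {divs : List Int} (hg : ¬ p * p ≤ n)
    (hp : 2 ≤ p) (hn : 0 < n) (hnx : n ∣ x)
    (hns : NoSmall p n) (hpl : PrimesLt p (x / n)) (hnd : divs.Nodup)
    (hcov : ∀ d : Int, d ∈ divs ↔ 1 ≤ d ∧ d ∣ x / n) :
    divs.Nodup ∧
    (∀ d : Int, d ∈ divs ↔ 1 ≤ d ∧ d ∣ x / n) ∧
    0 < n ∧ n ∣ x ∧
    (1 < n → Prime n ∧ ¬ n ∣ x / n) := by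
  refine ⟨hnd, hcov, hn, hnx, ?_⟩
  intro h1n
  have hprime : Prime n := pv_prime_of_no_small hp h1n hns (not_le.mp hg)
  refine ⟨hprime, ?_⟩
  intro hdvdm
  have := hpl n hprime (by omega) hdvdm
  have hpn : p ≤ n := by
    by_contra hlt
    push_neg at hlt
    exact hns n (by omega) hlt (dvd_refl n)
  omega

-- loop invariant of outerB: divs holds exactly the divisors of the cofactor x / n
theorem outerB_spec : ∀ (fuel : Nat) (x n p : Int) (divs : List Int),
    (n + 2 - p).toNat ≤ fuel →
    2 ≤ p → 0 < n → 0 < x → n ∣ x →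
    NoSmall p n → PrimesLt p (x / n) →
    divs.Nodup → (∀ d : Int, d ∈ divs ↔ 1 ≤ d ∧ d ∣ x / n) →
    (outerB fuel x n p divs).2.Nodup ∧
    (∀ d : Int, d ∈ (outerB fuel x n p divs).2 ↔
      1 ≤ d ∧ d ∣ x / (outerB fuel x n p divs).1) ∧
    0 < (outerB fuel x n p divs).1 ∧ (outerB fuel x n p divs).1 ∣ x ∧
    (1 < (outerB fuel x n p divs).1 →
      Prime (outerB fuel x n p divs).1 ∧
      ¬ (outerB fuel x n p divs).1 ∣ x / (outerB fuel x n p divs).1) := by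
  intro fuel
  induction fuel with
  | zero =>
    intro x n p divs hmeas hp hn hx hnx hns hpl hnd hcov
    by_cases hg : p * p ≤ n
    · exfalso
      have hpos : 0 < n + 2 - p := by nlinarith [sq_nonneg (2 * p - 1)]
      omega
    · exact outerB_exit hg hp hn hnx hns hpl hnd hcov
  | succ fuel IH =>
    intro x n p divs hmeas hp hn hx hnx hns hpl hnd hcov
    by_cases hg : p * p ≤ n
    · rw [outerB, if_pos hg]
      obtain ⟨e, he1, he2, he3, he4⟩ :=
        stripB_spec n.toNat p n 1 [1] (by omega) hn (le_refl _)
      set r := stripB n.toNat p n 1 [1] with hr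
      set n' := r.1 with hn'
      have hmx : x / n * n = x := Int.ediv_mul_cancel hnx
      set m := x / n with hmdef
      have hm0 : 0 < m := by nlinarith
      have hn'n : n' ∣ n := ⟨p ^ e, he1.symm⟩
      have hn'x : n' ∣ x := hn'n.trans hnx
      have hpe1 : (1 : Int) ≤ p ^ e := one_le_pow₀ (by omega)
      have hn'le : n' ≤ n := by nlinarith
      have hpos : 0 < n + 2 - p := by nlinarith [sq_nonneg (2 * p - 1)]
      have hpowers : r.2.2 = (List.range (e + 1)).map (fun k => p ^ k) := by
        rw [he4, List.singleton_append, List.range_succ_eq_map, List.map_cons,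
          List.map_map]
        congr 1
        · exact (pow_zero p).symm
        · apply List.map_congr_left
          intro k _
          simp [Function.comp_apply]
      have hns' : NoSmall (p + 1) n' := by
        intro k hk2 hkp hkdvd
        by_cases hkp' : k < p
        · exact hns k hk2 hkp' (hkdvd.trans hn'n)
        · have hkeq : k = p := by omega
          subst hkeq
          exact he3 hkdvd
      by_cases he0 : e = 0
      · subst he0
        have hn'eq : n' = n := by simpa using he1
        have hdivs : divs.flatMap (fun d => r.2.2.map (fun q => d * q)) = divs := by
          rw [hpowers]
          simp [List.range_succ]
        rw [hdivs]
        apply IH x n' (p + 1) divs (by omega) (by omega) (by omega) hx hn'x hns' ?_ hnd ?_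
        · intro q hq hq0 hqdvd
          rw [hn'eq] at hqdvd
          have := hpl q hq hq0 hqdvd
          omega
        · intro d
          rw [hn'eq]
          exact hcov d
      · have hppow : p ^ e ∣ n := ⟨n', by rw [← he1]; ring⟩
        have hpdvdn : p ∣ n := (dvd_pow_self p he0).trans hppow
        have hpp : Prime p := pv_prime_of_dvd_no_small hp hn hns hpdvdn
        have hpm : ¬ p ∣ m := fun hdm => absurd (hpl p hpp (by omega) hdm) (by omega)
        obtain ⟨hnd', hcov'⟩ :=
          pv_cover_step e hm0 hpp (by omega) hpm divs hnd hcov r.2.2 hpowers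
        have hsplit : x = m * p ^ e * n' := by rw [← hmx, ← he1]; ring
        have hm' : x / n' = m * p ^ e := by
          rw [hsplit]; exact Int.mul_ediv_cancel _ (by omega)
        apply IH x n' (p + 1) _ (by omega) (by omega) he2 hx hn'x hns' ?_ hnd' ?_
        · rw [hm']
          intro q hq hq0 hqdvd
          rcases (hq.dvd_mul).mp hqdvd with hcase | hcase
          · have := hpl q hq hq0 hcase
            omega
          · have hqp : q ∣ p := hq.dvd_of_dvd_pow hcase
            have := pv_prime_dvd_prime hpp hq (by omega) hq0 hqp
            omega
        · intro d
          rw [hm']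
          exact hcov' d
    · rw [outerB, if_neg hg]
      exact outerB_exit hg hp hn hnx hns hpl hnd hcov

theorem f_alt_eq (x : Int) :
    f_alt x = if ((pvD x).length : Int) < 5 then none
      else some ((pvD x).reverse.take 5) := by
  by_cases hx2 : x < 2
  · have hnil : pvD x = [] := by
      unfold pvD
      rw [PySem.List.pyRange_one_eq_nil (by omega)]
      rfl
    simp [f_alt, hx2, hnil]
  · simp only [f_alt]
    rw [if_neg hx2]
    have hxx : x / x = 1 := Int.ediv_self (by omega)
    obtain ⟨hRnd, hRcov, hR0, hRx, hRp⟩ :=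
      outerB_spec x.toNat x x 2 [1] (by omega) (le_refl 2) (by omega)
        (by omega) dvd_rfl
        (fun k hk2 hkp _ => absurd hkp (by omega))
        (by
          rw [hxx]
          intro q hq hq0 hqdvd
          exact absurd (isUnit_of_dvd_one hqdvd) hq.not_unit)
        (by simp)
        (by
          intro d
          rw [hxx]
          simp only [List.mem_singleton]
          constructor
          · rintro rfl
            exact ⟨le_refl 1, one_dvd 1⟩
          · rintro ⟨hd1, hdvd⟩
            rcases Int.isUnit_iff.mp (isUnit_of_dvd_one hdvd) with h | h <;> omega)
    set R := outerB x.toNat x x 2 [1] with hR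
    set D := if 1 < R.1 then R.2.flatMap (fun d => [(1 : Int), R.1].map (fun q => d * q))
      else R.2 with hD
    have hDn : D.Nodup ∧ ∀ d : Int, d ∈ D ↔ 1 ≤ d ∧ d ∣ x := by
      by_cases h1 : 1 < R.1
      · rw [hD, if_pos h1]
        obtain ⟨hprime, hnotdvd⟩ := hRp h1
        have hmx' : x / R.1 * R.1 = x := Int.ediv_mul_cancel hRx
        have hm0 : 0 < x / R.1 := by nlinarith
        obtain ⟨h1', h2'⟩ := pv_cover_step 1 hm0 hprime (by omega) hnotdvd R.2 hRnd
          hRcov [(1 : Int), R.1] (by simp [List.range_succ])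
        refine ⟨h1', fun d => (h2' d).trans ?_⟩
        rw [pow_one, hmx']
      · rw [hD, if_neg h1]
        have hR1 : R.1 = 1 := by omega
        refine ⟨hRnd, fun d => (hRcov d).trans ?_⟩
        rw [hR1]
        simp
    obtain ⟨hDnd, hDcov⟩ := hDn
    set proper := D.filter (fun d => !(d == 1) && !(d == x)) with hPr
    have hpmem : ∀ d : Int, d ∈ proper ↔ d ∈ pvD x := by
      intro d
      rw [hPr, List.mem_filter, hDcov d, mem_pvD]
      simp only [Bool.and_eq_true, Bool.not_eq_eq_eq_not, Bool.not_true,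
        beq_eq_false_iff_ne, ne_eq]
      constructor
      · rintro ⟨⟨hd1, hdvd⟩, hne1, hnex⟩
        have hle := Int.le_of_dvd (by omega) hdvd
        exact ⟨by omega, by omega, (PySem.Int.mod_eq_zero_iff_dvd x d).mpr hdvd⟩
      · rintro ⟨hd2, hdx, hm⟩
        have hdvd := (PySem.Int.mod_eq_zero_iff_dvd x d).mp hm
        exact ⟨⟨by omega, hdvd⟩, by omega, by omega⟩
    have hpnd : proper.Nodup := hDnd.filter _
    have hperm : proper.Perm (pvD x).reverse := by
      rw [List.perm_ext_iff_of_nodup hpnd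
        (by rw [List.nodup_reverse]; exact (pairwise_lt_pvD x).imp ne_of_lt)]
      intro d
      rw [List.mem_reverse]
      exact hpmem d
    have hsorted : PySem.List.sorted proper (fun v => v) true = (pvD x).reverse :=
      PySem.List.sorted_rev_eq_of_perm_of_pairwise_gt _ _ _ hperm.symm
        (by rw [List.pairwise_reverse]; exact pairwise_lt_pvD x)
    rw [hsorted, List.length_reverse, PySem.List.slice_to _ (by norm_num : (0:Int) ≤ 5)]
    by_cases hlen : ((pvD x).length : Int) < 5
    · rw [if_neg (by omega), if_pos hlen]
    · rw [if_pos (by omega), if_neg hlen]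
      rfl

-- ===== VERDICT (by name: the statement is the Claim_ definition above) =====
theorem f_spec : Claim_equal_f := by
  intro x _
  unfold Spec_f
  exact (f_closed x).trans (f_alt_eq x).symm
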